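-- pv_equiv track=rewrite | github.com/PramitBarua/system_generator | system_generator/system_generator_class.py | unit_cell
-- ===== SOURCE A (Python) =====
-- def unit_cell(system_block):
--     count = 0
--     map_block = []
--     system = []
--     for idx1 in range(len(system_block)):
--         map_buf = []
--         for idx2, item in enumerate(system_block[idx1]):
--             system.append(item)
--             count += 1
--             map_buf.append(count)
--         map_block.append(map_buf)
--     return system, map_block
-- ===== SOURCE B (Python) =====
-- def unit_cell(system_block):
--     # Structural recursion: the result for rows[0:] is the head row prepended to the
--     # result for rows[1:], with the head's index list computed arithmetically from
--     # the running start offset.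
--     def go(rows, start):
--         if not rows:
--             return [], []
--         head = rows[0]
--         sys_rest, map_rest = go(rows[1:], start + len(head))
--         return list(head) + sys_rest, [list(range(start + 1, start + len(head) + 1))] + map_rest
--     system, map_block = go(system_block, 0)
--     return system, map_block
-- ===== Notes on version B (the rewrite author's own statement) =====
-- stated objective: alternative
-- what changed: B replaces A's nested imperative loops with a per-element counter by a structural recursion over the rows that assembles both outputs back-to-front, deriving each row's index list arithmetically from a start offset instead of incrementing a counter per element.
import Mathlib
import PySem

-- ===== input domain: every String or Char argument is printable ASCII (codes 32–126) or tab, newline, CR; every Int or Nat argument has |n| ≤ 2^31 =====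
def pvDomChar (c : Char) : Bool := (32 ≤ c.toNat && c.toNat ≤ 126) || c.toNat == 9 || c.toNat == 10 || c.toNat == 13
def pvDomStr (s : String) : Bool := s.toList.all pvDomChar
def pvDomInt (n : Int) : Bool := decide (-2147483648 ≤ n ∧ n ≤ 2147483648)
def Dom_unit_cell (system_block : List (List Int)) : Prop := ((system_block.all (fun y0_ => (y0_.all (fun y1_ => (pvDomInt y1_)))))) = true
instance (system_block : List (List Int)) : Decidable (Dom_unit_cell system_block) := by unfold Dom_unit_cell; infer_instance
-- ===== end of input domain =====

-- B rebuilds both outputs by structural recursion over the rows (back-to-front assembly,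
-- index lists derived arithmetically from a start offset) instead of A's nested loops
-- with a per-element counter: an alternative decomposition of similar cost.


-- ===== PORT A =====
-- inner loop body: per item, append to system, count += 1, append count to map_buf
def pvAInner (st : Int × List Int × List Int) (p : Int × Int) : Int × List Int × List Int :=
  (st.1 + 1, st.2.1 ++ [st.1 + 1], st.2.2 ++ [p.2])

-- outer loop body over idx1; state = (count, map_block, system)
def pvAOuter (sb : List (List Int)) (st : Int × List (List Int) × List Int) (idx1 : Int) :
    Int × List (List Int) × List Int :=
  let row := PySem.List.pyGetD sb idx1 []
  let r := (PySem.List.enumerate row 0).foldl pvAInner (st.1, [], st.2.2)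
  (r.1, st.2.1 ++ [r.2.1], r.2.2)

def unit_cell (system_block : List (List Int)) : List Int × List (List Int) :=
  let st := (PySem.List.pyRange 0 (system_block.length : Int) 1).foldl
    (pvAOuter system_block) (0, [], [])
  (st.2.2, st.2.1)

-- ===== PORT B =====
-- go(rows, start): head row prepended to the recursive result for the tail,
-- head's index list = range(start+1, start+len(head)+1)
def pvBGo (rows : List (List Int)) (start : Int) : List Int × List (List Int) :=
  match rows with
  | [] => ([], [])
  | head :: tail =>
      let r := pvBGo tail (start + (head.length : Int))
      (head ++ r.1, PySem.List.pyRange (start + 1) (start + (head.length : Int) + 1) 1 :: r.2)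

def unit_cell_alt (system_block : List (List Int)) : List Int × List (List Int) :=
  pvBGo system_block 0

-- ===== PRECONDITION & SPEC =====
def Spec_unit_cell (system_block : List (List Int)) (out : List Int × List (List Int)) : Prop := out = unit_cell_alt system_block
instance (system_block : List (List Int)) (out : List Int × List (List Int)) : Decidable (Spec_unit_cell system_block out) := by unfold Spec_unit_cell; infer_instance

-- ===== CLAIM (what is proved, stated in full; the proofs are below) =====
def Claim_equal_unit_cell : Prop := ∀ (system_block : List (List Int)), Dom_unit_cell system_block → Spec_unit_cell system_block (unit_cell system_block)

-- ===== LEMMAS AND PROOFS =====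

-- A's inner loop, run from counter c, appends the row and the index range c+1 … c+len(row)
theorem pvAInner_run (row : List Int) : ∀ (s : Int) (c : Int) (buf sys : List Int),
    (PySem.List.enumerate row s).foldl pvAInner (c, buf, sys)
      = (c + (row.length : Int), buf ++ PySem.List.pyRange (c + 1) (c + (row.length : Int) + 1) 1, sys ++ row) := by
  induction row with
  | nil =>
      intro s c buf sys
      simp [PySem.List.enumerate, PySem.List.pyRange_one_eq_nil (le_refl (c + 1))]
  | cons x xs ih =>
      intro s c buf sys
      have hcons : PySem.List.pyRange (c + 1) (c + ((x :: xs).length : Int) + 1) 1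
          = (c + 1) :: PySem.List.pyRange (c + 2) (c + ((x :: xs).length : Int) + 1) 1 := by
        have := PySem.List.pyRange_one_cons (a := c + 1) (b := c + ((x :: xs).length : Int) + 1)
          (by push_cast [List.length_cons]; omega)
        simpa [add_assoc] using this
      simp only [PySem.List.enumerate, List.foldl_cons, pvAInner]
      rw [ih (s + 1) (c + 1) (buf ++ [c + 1]) (sys ++ [x]), hcons]
      have h3 : c + 1 + 1 = c + 2 := by ring
      rw [h3]
      simp
      constructor
      · omega
      · congr 1; omega

-- A's per-row body, seen as a function of the row value (proof helper)
def pvARow (st : Int × List (List Int) × List Int) (row : List Int) : Int × List (List Int) × List Int :=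
  let r := (PySem.List.enumerate row 0).foldl pvAInner (st.1, [], st.2.2)
  (r.1, st.2.1 ++ [r.2.1], r.2.2)

-- A's outer loop equals B's recursion: map/system components are B's, appended to the accumulators
theorem pvARow_run (sb : List (List Int)) : ∀ (c : Int) (mb : List (List Int)) (sys : List Int),
    sb.foldl pvARow (c, mb, sys)
      = ((sb.foldl pvARow (c, mb, sys)).1, mb ++ (pvBGo sb c).2, sys ++ (pvBGo sb c).1) := by
  induction sb with
  | nil => intro c mb sys; simp [pvBGo]
  | cons x xs ih =>
      intro c mb sys
      simp only [List.foldl_cons]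
      have hx : pvARow (c, mb, sys) x
          = (c + (x.length : Int), mb ++ [PySem.List.pyRange (c + 1) (c + (x.length : Int) + 1) 1], sys ++ x) := by
        simp [pvARow, pvAInner_run]
      rw [hx, ih]
      simp [pvBGo]

-- ===== VERDICT (by name: the statement is the Claim_ definition above) =====
theorem unit_cell_spec : Claim_equal_unit_cell := by
  intro sb _
  unfold Spec_unit_cell unit_cell unit_cell_alt
  have hfun : (pvAOuter sb) = (fun st idx => pvARow st (PySem.List.pyGetD sb idx [])) := rfl
  rw [hfun, PySem.List.foldl_pyRange_zero_pyGetD' sb ([] : List Int) pvARow ((0 : Int), ([] : List (List Int)), ([] : List Int))]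
  rw [pvARow_run]
  simp
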